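-- pv_equiv track=rewrite | github.com/kldevv/leetcode-v2 | src/py/2038. Remove Colored Pieces if Both Neighbors are the Same Color/2038. Remove Colored Pieces if Both Neighbors are the Same Color.py | winnerOfGame
-- ===== SOURCE A (Python) =====
-- def winnerOfGame(colors: str) -> bool:
--     A_cnt = 0
--     B_cnt = 0
--     for i in range(1, len(colors)-1):
--         if colors[i] == colors[i-1] == colors[i+1]:
--             if colors[i] == "A":
--                 A_cnt += 1
--             else:
--                 B_cnt += 1
--
--     return A_cnt > B_cnt
-- ===== SOURCE B (Python) =====
-- def winnerOfGame(colors: str) -> bool: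
--     # stage 1: run-length encode the string into (char, length) pairs
--     runs = []
--     for c in colors:
--         if runs and runs[-1][0] == c:
--             runs[-1] = (c, runs[-1][1] + 1)
--         else:
--             runs.append((c, 1))
--     # stage 2: each run of length L contributes max(L-2, 0) removable pieces,
--     # counted +1 for Alice ('A') and -1 for Bob (any other colour)
--     diff = 0
--     for ch, n in runs:
--         diff += (1 if ch == 'A' else -1) * max(n - 2, 0)
--     return diff > 0
-- ===== Notes on version B (the rewrite author's own statement) =====
-- stated objective: alternative
-- what changed: Replaces the per-index sliding-triple check with two staged passes: first run-length encode the string into (char, length) pairs, then sum a single signed counter of max(L-2,0) per run (+ for 'A', - otherwise) and compare it to zero.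
import Mathlib
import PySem

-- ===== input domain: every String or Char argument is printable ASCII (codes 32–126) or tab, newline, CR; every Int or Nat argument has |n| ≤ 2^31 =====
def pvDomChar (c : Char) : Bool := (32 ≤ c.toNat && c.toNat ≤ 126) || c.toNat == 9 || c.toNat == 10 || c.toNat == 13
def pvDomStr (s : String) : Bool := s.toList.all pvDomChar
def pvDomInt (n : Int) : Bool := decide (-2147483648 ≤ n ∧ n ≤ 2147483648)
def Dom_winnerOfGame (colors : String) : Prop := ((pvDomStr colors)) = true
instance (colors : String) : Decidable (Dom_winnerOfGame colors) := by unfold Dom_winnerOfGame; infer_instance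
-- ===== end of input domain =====

-- B replaces A's sliding-triple index scan with two staged passes (run-length encode,
-- then a signed sum of max(L-2,0) per run); objective: alternative decomposition.

-- ===== PORT A =====
-- the loop body of A: read colors[i-1], colors[i], colors[i+1] (always in range for i in the range)
def aStep (cs : List Char) (st : Int × Int) (i : Int) : Int × Int :=
  if PySem.List.pyGetD cs i ' ' = PySem.List.pyGetD cs (i - 1) ' ' ∧
     PySem.List.pyGetD cs (i - 1) ' ' = PySem.List.pyGetD cs (i + 1) ' ' then
    if PySem.List.pyGetD cs i ' ' = 'A' then (st.1 + 1, st.2) else (st.1, st.2 + 1)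
  else st

def winnerOfGame (colors : String) : Bool :=
  let cs := colors.toList
  let st := (PySem.List.pyRange 1 ((cs.length : Int) - 1) 1).foldl (aStep cs) (0, 0)
  decide (st.1 > st.2)

-- ===== PORT B =====
-- stage-1 loop body: extend the last run if it has the same colour, else append a fresh run
def rleStep (runs : List (Char × Int)) (c : Char) : List (Char × Int) :=
  match runs.getLast? with
  | some (ch, n) => if ch = c then runs.dropLast ++ [(c, n + 1)] else runs ++ [(c, 1)]
  | none => runs ++ [(c, 1)]

-- stage-2 loop body: signed contribution of one run
def diffStep (d : Int) (p : Char × Int) : Int :=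
  d + (if p.1 = 'A' then 1 else -1) * max (p.2 - 2) 0

def winnerOfGame_alt (colors : String) : Bool :=
  let runs := colors.toList.foldl rleStep []
  let diff := runs.foldl diffStep 0
  decide (diff > 0)

-- ===== PRECONDITION & SPEC =====
def Spec_winnerOfGame (colors : String) (out : Bool) : Prop := out = winnerOfGame_alt colors
instance (colors : String) (out : Bool) : Decidable (Spec_winnerOfGame colors out) := by unfold Spec_winnerOfGame; infer_instance

-- ===== CLAIM (what is proved, stated in full; the proofs are below) =====
def Claim_equal_winnerOfGame : Prop := ∀ (colors : String), Dom_winnerOfGame colors → Spec_winnerOfGame colors (winnerOfGame colors)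

-- ===== LEMMAS AND PROOFS =====

-- reference count: pairs of (#same-char triples centred on 'A', centred on non-'A')
def trip : List Char → Int × Int
  | x :: y :: z :: t =>
    let r := trip (y :: z :: t)
    if x = y ∧ y = z then (if y = 'A' then (r.1 + 1, r.2) else (r.1, r.2 + 1)) else r
  | _ => (0, 0)

theorem aLoop_trip : ∀ (t cs : List Char) (k : Nat) (a b : Int), cs.drop k = t →
    (PySem.List.pyRange ((k : Int) + 1) ((cs.length : Int) - 1) 1).foldl (aStep cs) (a, b)
      = (a + (trip t).1, b + (trip t).2) := by
  intro t
  induction t with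
  | nil =>
    intro cs k a b hdrop
    have hlen : cs.length ≤ k := by
      have := congrArg List.length hdrop; simp at this; omega
    rw [PySem.List.pyRange_one_eq_nil (by omega)]
    simp [trip]
  | cons x t ih =>
    intro cs k a b hdrop
    have hlen : cs.length = k + 1 + t.length := by
      have h1 := congrArg List.length hdrop
      simp at h1
      have : k ≤ cs.length := by
        by_contra h
        have : cs.drop k = [] := List.drop_eq_nil_of_le (by omega)
        rw [this] at hdrop; simp at hdrop
      omega
    match t, ih, hdrop with
    | [], _, hdrop =>
      rw [PySem.List.pyRange_one_eq_nil (by simp at hlen; omega)]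
      simp [trip]
    | [y], _, hdrop =>
      rw [PySem.List.pyRange_one_eq_nil (by simp at hlen; omega)]
      simp [trip]
    | y :: z :: t', ih, hdrop =>
      have hlen3 : cs.length = k + 3 + t'.length := by simp at hlen; omega
      have hget : ∀ (j : Nat), cs.getD (k + j) ' ' = (x :: y :: z :: t').getD j ' ' := by
        intro j
        simp [List.getD_eq_getElem?_getD, ← hdrop, List.getElem?_drop]
      have hdrop' : cs.drop (k + 1) = y :: z :: t' := by
        have := congrArg (List.drop 1) hdrop
        rwa [List.drop_drop] at this
      rw [PySem.List.pyRange_one_cons (by omega)]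
      rw [List.foldl_cons]
      have i0 : ((k : Int) + 1 - 1) = ((k : Nat) : Int) := by ring
      have i1 : ((k : Int) + 1) = (((k + 1 : Nat)) : Int) := by push_cast; ring
      have i2 : ((k : Int) + 1 + 1) = (((k + 2 : Nat)) : Int) := by push_cast; ring
      have hx : cs.getD k ' ' = x := by have := hget 0; simpa using this
      have hy : cs.getD (k + 1) ' ' = y := by have := hget 1; simpa using this
      have hz : cs.getD (k + 2) ' ' = z := by have := hget 2; simpa using this
      have hstep : aStep cs (a, b) ((k : Int) + 1)
          = if y = x ∧ x = z then (if y = 'A' then (a + 1, b) else (a, b + 1)) else (a, b) := by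
        simp only [aStep]
        rw [i0, i2, i1]
        simp only [PySem.List.pyGetD_natCast, hx, hy, hz]
      rw [hstep]
      have htrip : trip (x :: y :: z :: t')
          = if y = x ∧ x = z then
              (if y = 'A' then ((trip (y :: z :: t')).1 + 1, (trip (y :: z :: t')).2)
               else ((trip (y :: z :: t')).1, (trip (y :: z :: t')).2 + 1))
            else trip (y :: z :: t') := by
        by_cases h : x = y ∧ y = z
        · obtain ⟨h1, h2⟩ := h; subst h1; subst h2
          simp [trip]
        · have h' : ¬ (y = x ∧ x = z) := by
            intro ⟨h1, h2⟩; exact h ⟨h1.symm, h1 ▸ h2⟩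
          simp [trip, h, h']
      rw [htrip]
      by_cases hc : y = x ∧ x = z
      · rw [if_pos hc, if_pos hc]
        by_cases hA : y = 'A'
        · rw [if_pos hA, if_pos hA]
          have := ih cs (k + 1) (a + 1) b hdrop'
          rw [i1, this]
          simp only [Prod.mk.injEq]
          exact ⟨by ring, trivial⟩
        · rw [if_neg hA, if_neg hA]
          have := ih cs (k + 1) a (b + 1) hdrop'
          rw [i1, this]
          simp only [Prod.mk.injEq]
          exact ⟨trivial, by ring⟩
      · rw [if_neg hc, if_neg hc]
        have := ih cs (k + 1) a b hdrop'
        rw [i1, this]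

-- rleStep touches only the last run, so a frozen prefix passes through the stage-1 fold
theorem rleStep_ne_nil (rs : List (Char × Int)) (c : Char) : rleStep rs c ≠ [] := by
  unfold rleStep
  match h : rs.getLast? with
  | some p =>
    match p with
    | (ch, n) => by_cases hc : ch = c <;> simp [hc]
  | none => simp

theorem foldl_rle_append : ∀ (t : List Char) (pre rs : List (Char × Int)), rs ≠ [] →
    List.foldl rleStep (pre ++ rs) t = pre ++ List.foldl rleStep rs t := by
  intro t
  induction t with
  | nil => intro pre rs _; rfl
  | cons c t ih =>
    intro pre rs hne
    rw [List.foldl_cons, List.foldl_cons]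
    have hstep : rleStep (pre ++ rs) c = pre ++ rleStep rs c := by
      unfold rleStep
      rw [List.getLast?_append_of_ne_nil pre hne]
      match h : rs.getLast? with
      | some p =>
        match p with
        | (ch, n) =>
          simp only
          by_cases hc : ch = c
          · rw [if_pos hc, if_pos hc, List.dropLast_append_of_ne_nil hne, List.append_assoc]
          · rw [if_neg hc, if_neg hc, List.append_assoc]
      | none => simp only; rw [List.append_assoc]
    rw [hstep, ih (pre) (rleStep rs c) (rleStep_ne_nil rs c)]

theorem foldl_diff_shift : ∀ (l : List (Char × Int)) (a : Int),
    l.foldl diffStep a = a + l.foldl diffStep 0 := by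
  intro l
  induction l with
  | nil => intro a; simp
  | cons p l ih =>
    intro a
    rw [List.foldl_cons, List.foldl_cons, ih (diffStep a p), ih (diffStep 0 p)]
    unfold diffStep; ring

-- the heart: starting stage 1 mid-run (y, r), the final signed sum is the current run's
-- contribution plus the signed triple count continuing from last-two-chars context (x, y)
theorem rle_trip : ∀ (t : List Char) (x y : Char) (r : Int), 1 ≤ r → (2 ≤ r ↔ x = y) →
    (List.foldl rleStep [(y, r)] t).foldl diffStep 0
      = (if y = 'A' then 1 else -1) * max (r - 2) 0 + ((trip (x :: y :: t)).1 - (trip (x :: y :: t)).2) := by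
  intro t
  induction t with
  | nil =>
    intro x y r _ _
    simp [diffStep, trip]
  | cons z t ih =>
    intro x y r hr1 hr2
    rw [List.foldl_cons]
    by_cases hzy : z = y
    · subst hzy
      have hstep : rleStep [(z, r)] z = [(z, r + 1)] := by
        unfold rleStep; simp
      rw [hstep, ih z z (r + 1) (by omega) (by simp; omega)]
      have htrip : trip (x :: z :: z :: t)
          = (if x = z then
               (if z = 'A' then ((trip (z :: z :: t)).1 + 1, (trip (z :: z :: t)).2)
                else ((trip (z :: z :: t)).1, (trip (z :: z :: t)).2 + 1))
             else trip (z :: z :: t)) := by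
        by_cases h : x = z
        · simp [trip, h]
        · simp [trip, h]
      rw [htrip]
      by_cases hx : x = z
      · have h2 : 2 ≤ r := hr2.mpr hx
        rw [if_pos hx]
        by_cases hA : z = 'A' <;> simp [hA] <;> omega
      · have h2 : ¬ 2 ≤ r := fun h => hx (hr2.mp h)
        rw [if_neg hx]
        by_cases hA : z = 'A' <;> simp [hA] <;> omega
    · have hyz : ¬ y = z := fun h => hzy (Eq.symm h)
      have hstep : rleStep [(y, r)] z = [(y, r)] ++ [(z, 1)] := by
        unfold rleStep; simp [hyz]
      rw [hstep, foldl_rle_append t [(y, r)] [(z, 1)] (by simp)]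
      rw [List.foldl_append]
      have hone : List.foldl diffStep 0 [(y, r)] = (if y = 'A' then 1 else -1) * max (r - 2) 0 := by
        simp [diffStep]
      rw [hone, foldl_diff_shift]
      have hiff : ((2:Int) ≤ 1 ↔ y = z) := by
        constructor
        · intro h; omega
        · intro h; exact absurd h.symm hzy
      rw [ih y z 1 (by omega) hiff]
      have htrip : trip (x :: y :: z :: t) = trip (y :: z :: t) := by
        have : ¬ (x = y ∧ y = z) := fun h => hzy h.2.symm
        simp [trip, this]
      rw [htrip]
      simp

-- ===== VERDICT (by name: the statement is the Claim_ definition above) =====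
theorem winnerOfGame_spec : Claim_equal_winnerOfGame := by
  unfold Claim_equal_winnerOfGame Spec_winnerOfGame winnerOfGame winnerOfGame_alt
  intro colors _
  have ha : (PySem.List.pyRange 1 ((colors.toList.length : Int) - 1) 1).foldl (aStep colors.toList) (0, 0)
      = (0 + (trip colors.toList).1, 0 + (trip colors.toList).2) := by
    have := aLoop_trip colors.toList colors.toList 0 0 0 (by simp)
    simpa using this
  have hb : (colors.toList.foldl rleStep []).foldl diffStep 0
      = (trip colors.toList).1 - (trip colors.toList).2 := by
    match hcs : colors.toList with
    | [] => simp [trip]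
    | c :: t =>
      rw [List.foldl_cons]
      have h0 : rleStep [] c = [(c, 1)] := by unfold rleStep; simp
      rw [h0]
      have hx : (if c = 'A' then 'B' else 'A') ≠ c := by
        by_cases h : c = 'A'
        · simp [h]
        · simp [h]; exact fun hh => h (Eq.symm hh)
      have hiff : ((2:Int) ≤ 1 ↔ (if c = 'A' then 'B' else 'A') = c) := by
        constructor
        · intro h; omega
        · intro h; exact absurd h hx
      rw [rle_trip t (if c = 'A' then 'B' else 'A') c 1 (by omega) hiff]
      have htrip : trip ((if c = 'A' then 'B' else 'A') :: c :: t) = trip (c :: t) := by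
        match t with
        | [] => simp [trip]
        | z :: t' =>
          have : ¬ ((if c = 'A' then 'B' else 'A') = c ∧ c = z) := fun h => hx h.1
          simp only [trip]
          rw [if_neg this]
      rw [htrip]
      simp
  simp only [ha, hb]
  rw [decide_eq_decide]
  omega
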